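-- pv_equiv track=rewrite | github.com/datajuicer/data-juicer-agents | eval_cases/run_eval.py | _classify_workflow_from_operators
-- ===== SOURCE A (Python) =====
-- from typing import Any, Callable, Dict, List, Optional, Union
--
-- RAG_INDICATORS = [
--     "text_length_filter",
--     "document_deduplicator",
--     "document_minhash_deduplicator",
--     "document_simhash_deduplicator",
--     "clean_email_mapper",
--     "clean_links_mapper",
--     "clean_html_mapper",
--     "remove_",
--     "language_id_score_filter",
--     "perplexity_filter",
--     "words_num_filter",
--     "alphanumeric_filter",
--     "whitespace_normalization_mapper",
--     "punctuation_normalization_mapper",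
-- ]
--
-- MULTIMODAL_INDICATORS = [
--     "image_",
--     "phash",
--     "ray_image_deduplicator",
--     "image_deduplicator",
--     "image_text_matching",
--     "image_aspect_ratio",
--     "image_size_filter",
--     "image_watermark",
-- ]
--
-- def _classify_workflow_from_operators(operators: List[str]) -> Optional[str]:
--     """Classify workflow type from operator names."""
--     if not operators:
--         return None
--
--     operators_str = " ".join(op.lower() for op in operators)
--
--     rag_score = sum(1 for ind in RAG_INDICATORS if ind in operators_str)
--     multimodal_score = sum(1 for ind in MULTIMODAL_INDICATORS if ind in operators_str)
--
--     if multimodal_score > rag_score: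
--         return "multimodal_dedup"
--     elif rag_score > 0:
--         return "rag_cleaning"
--     return None
-- ===== SOURCE B (Python) =====
-- from typing import List, Optional
--
-- RAG_INDICATORS = [
--     "text_length_filter",
--     "document_deduplicator",
--     "document_minhash_deduplicator",
--     "document_simhash_deduplicator",
--     "clean_email_mapper",
--     "clean_links_mapper",
--     "clean_html_mapper",
--     "remove_",
--     "language_id_score_filter",
--     "perplexity_filter",
--     "words_num_filter",
--     "alphanumeric_filter",
--     "whitespace_normalization_mapper",
--     "punctuation_normalization_mapper",
-- ]
--
-- MULTIMODAL_INDICATORS = [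
--     "image_",
--     "phash",
--     "ray_image_deduplicator",
--     "image_deduplicator",
--     "image_text_matching",
--     "image_aspect_ratio",
--     "image_size_filter",
--     "image_watermark",
-- ]
--
-- def _classify_workflow_from_operators(operators: List[str]) -> Optional[str]:
--     """Classify workflow type from operator names (per-operator matching, no joined blob)."""
--     if not operators:
--         return None
--
--     rag_matched = set()
--     multimodal_matched = set()
--     for op in operators:
--         op_l = op.lower()
--         for ind in RAG_INDICATORS:
--             if ind in op_l:
--                 rag_matched.add(ind)
--         for ind in MULTIMODAL_INDICATORS:
--             if ind in op_l:
--                 multimodal_matched.add(ind)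
--
--     rag_score = len(rag_matched)
--     multimodal_score = len(multimodal_matched)
--
--     if multimodal_score > rag_score:
--         return "multimodal_dedup"
--     elif rag_score > 0:
--         return "rag_cleaning"
--     return None
-- ===== Notes on version B (the rewrite author's own statement) =====
-- stated objective: alternative
-- what changed: B never builds the space-joined lowercase blob: it scans each operator separately, collecting matched indicators into sets whose sizes are the scores (correct because no indicator contains a space, so a match cannot span operator boundaries).
import Mathlib
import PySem

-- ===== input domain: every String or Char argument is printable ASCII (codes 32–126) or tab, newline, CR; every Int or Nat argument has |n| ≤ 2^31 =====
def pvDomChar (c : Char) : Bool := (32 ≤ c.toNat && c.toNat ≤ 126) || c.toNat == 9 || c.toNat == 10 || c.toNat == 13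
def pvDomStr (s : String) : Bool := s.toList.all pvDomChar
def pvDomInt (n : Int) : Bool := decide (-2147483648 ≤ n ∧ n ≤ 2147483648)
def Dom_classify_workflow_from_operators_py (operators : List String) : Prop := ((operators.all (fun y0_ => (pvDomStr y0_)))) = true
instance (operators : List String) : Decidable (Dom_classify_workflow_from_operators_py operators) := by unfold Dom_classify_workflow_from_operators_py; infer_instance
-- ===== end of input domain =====

-- B drops A's space-joined blob and matches indicators per operator into sets; equivalent since no indicator contains a space.


-- ===== PORT A =====
def RAG_INDICATORS : List String :=
  ["text_length_filter", "document_deduplicator", "document_minhash_deduplicator",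
   "document_simhash_deduplicator", "clean_email_mapper", "clean_links_mapper",
   "clean_html_mapper", "remove_", "language_id_score_filter", "perplexity_filter",
   "words_num_filter", "alphanumeric_filter", "whitespace_normalization_mapper",
   "punctuation_normalization_mapper"]

def MULTIMODAL_INDICATORS : List String :=
  ["image_", "phash", "ray_image_deduplicator", "image_deduplicator",
   "image_text_matching", "image_aspect_ratio", "image_size_filter", "image_watermark"]

def classify_workflow_from_operators_py (operators : List String) : Option String :=
  if operators = [] then none
  else
    let operators_str := PySem.Str.join " " (operators.map PySem.Str.lower)
    let rag_score : Int := RAG_INDICATORS.countP (fun ind => PySem.Str.isIn ind operators_str)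
    let multimodal_score : Int := MULTIMODAL_INDICATORS.countP (fun ind => PySem.Str.isIn ind operators_str)
    if multimodal_score > rag_score then some "multimodal_dedup"
    else if rag_score > 0 then some "rag_cleaning"
    else none

-- ===== PORT B =====
def classify_workflow_from_operators_py_alt (operators : List String) : Option String :=
  if operators = [] then none
  else
    let st := operators.foldl
      (fun (st : PySem.Set String × PySem.Set String) op =>
        let opL := PySem.Str.lower op
        (RAG_INDICATORS.foldl (fun s ind => if PySem.Str.isIn ind opL then PySem.Set.add s ind else s) st.1,
         MULTIMODAL_INDICATORS.foldl (fun s ind => if PySem.Str.isIn ind opL then PySem.Set.add s ind else s) st.2))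
      (PySem.Set.empty, PySem.Set.empty)
    let rag_score := PySem.Set.len st.1
    let multimodal_score := PySem.Set.len st.2
    if multimodal_score > rag_score then some "multimodal_dedup"
    else if rag_score > 0 then some "rag_cleaning"
    else none

-- ===== PRECONDITION & SPEC =====
def Spec_classify_workflow_from_operators_py (operators : List String) (out : Option String) : Prop := out = classify_workflow_from_operators_py_alt operators
instance (operators : List String) (out : Option String) : Decidable (Spec_classify_workflow_from_operators_py operators out) := by unfold Spec_classify_workflow_from_operators_py; infer_instance

-- ===== CLAIM (what is proved, stated in full; the proofs are below) =====
def Claim_equal_classify_workflow_from_operators_py : Prop := ∀ (operators : List String), Dom_classify_workflow_from_operators_py operators → Spec_classify_workflow_from_operators_py operators (classify_workflow_from_operators_py operators)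

-- ===== LEMMAS AND PROOFS =====

-- a prefix not containing c stops before the first c
theorem pv_prefix_append_cons {c : Char} {cs : List Char} (as bs : List Char) (hc : c ∉ cs) :
    cs <+: as ++ c :: bs ↔ cs <+: as := by
  induction cs generalizing as with
  | nil => simp
  | cons d cs ih =>
    cases as with
    | nil =>
      simp only [List.nil_append, List.cons_prefix_cons]
      constructor
      · rintro ⟨rfl, -⟩; exact absurd (List.mem_cons_self) hc
      · intro h; exact absurd h (by simp)
    | cons a as =>
      simp only [List.cons_append, List.cons_prefix_cons]
      exact and_congr_right fun _ => ih as (fun h => hc (List.mem_cons_of_mem _ h))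

-- an infix not containing c lies entirely on one side of c
theorem pv_infix_append_cons {c : Char} {cs : List Char} (as bs : List Char)
    (hne : cs ≠ []) (hc : c ∉ cs) :
    cs <:+: as ++ c :: bs ↔ cs <:+: as ∨ cs <:+: bs := by
  induction as with
  | nil =>
    simp only [List.nil_append, List.infix_cons_iff]
    rw [show (c :: bs) = [] ++ c :: bs from rfl, pv_prefix_append_cons [] bs hc]
    simp [List.prefix_nil, hne]
  | cons a as ih =>
    simp only [List.cons_append, List.infix_cons_iff, ih, List.infix_cons_iff]
    rw [show (a :: (as ++ c :: bs)) = (a :: as) ++ c :: bs from rfl,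
        pv_prefix_append_cons (a :: as) bs hc]
    tauto

-- a space-free nonempty needle occurs in the space-joined text iff it occurs in some part
theorem pv_isIn_join {cs : List Char} (parts : List (List Char))
    (hne : cs ≠ []) (hc : ' ' ∉ cs) :
    PySem.Chars.isIn cs (PySem.Chars.join [' '] parts) = true ↔
      ∃ p ∈ parts, PySem.Chars.isIn cs p = true := by
  induction parts with
  | nil =>
    simp [PySem.Chars.join_nil, PySem.Chars.isIn_iff_infix, List.infix_nil, hne]
  | cons p t ih =>
    cases t with
    | nil => simp [PySem.Chars.join_singleton]
    | cons q t =>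
      rw [PySem.Chars.join_cons_cons,
          show p ++ [' '] ++ PySem.Chars.join [' '] (q :: t)
            = p ++ ' ' :: PySem.Chars.join [' '] (q :: t) by simp]
      simp only [PySem.Chars.isIn_iff_infix] at ih ⊢
      rw [pv_infix_append_cons p _ hne hc, ih]
      simp

-- membership/nodup through B's inner fold (one operator, one indicator list)
theorem pv_mem_inner (inds : List String) (opL : String) (s : PySem.Set String) (x : String) :
    x ∈ inds.foldl (fun s ind => if PySem.Str.isIn ind opL then PySem.Set.add s ind else s) s ↔
      x ∈ s ∨ (x ∈ inds ∧ PySem.Str.isIn x opL = true) := by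
  induction inds generalizing s with
  | nil => simp
  | cons i t ih =>
    simp only [List.foldl_cons, ih]
    by_cases h : PySem.Str.isIn i opL = true
    · simp only [h, if_pos, PySem.Set.mem_add]
      constructor
      · rintro (⟨h1 | rfl⟩ | h2)
        · exact Or.inl h1
        · exact Or.inr ⟨List.mem_cons_self, h⟩
        · exact Or.inr ⟨List.mem_cons_of_mem _ h2.1, h2.2⟩
      · rintro (h1 | ⟨hm, hx⟩)
        · exact Or.inl (Or.inl h1)
        · rcases List.mem_cons.mp hm with rfl | hm
          · exact Or.inl (Or.inr rfl)
          · exact Or.inr ⟨hm, hx⟩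
    · simp only [h, if_neg, Bool.false_eq_true, not_false_iff]
      constructor
      · rintro (h1 | h2)
        · exact Or.inl h1
        · exact Or.inr ⟨List.mem_cons_of_mem _ h2.1, h2.2⟩
      · rintro (h1 | ⟨hm, hx⟩)
        · exact Or.inl h1
        · rcases List.mem_cons.mp hm with rfl | hm
          · exact absurd hx h
          · exact Or.inr ⟨hm, hx⟩

theorem pv_nodup_inner (inds : List String) (opL : String) (s : PySem.Set String)
    (hs : s.Nodup) :
    (inds.foldl (fun s ind => if PySem.Str.isIn ind opL then PySem.Set.add s ind else s) s).Nodup := by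
  induction inds generalizing s with
  | nil => exact hs
  | cons i t ih =>
    simp only [List.foldl_cons]
    split
    · exact ih _ (PySem.Set.nodup_add _ _ hs)
    · exact ih _ hs

-- B's pair-state fold splits into two independent folds
theorem pv_fold_pair (ops : List String) (s1 s2 : PySem.Set String) :
    ops.foldl (fun (st : PySem.Set String × PySem.Set String) op =>
        (RAG_INDICATORS.foldl (fun s ind => if PySem.Str.isIn ind (PySem.Str.lower op) then PySem.Set.add s ind else s) st.1,
         MULTIMODAL_INDICATORS.foldl (fun s ind => if PySem.Str.isIn ind (PySem.Str.lower op) then PySem.Set.add s ind else s) st.2)) (s1, s2)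
      = (ops.foldl (fun s op => RAG_INDICATORS.foldl (fun s ind => if PySem.Str.isIn ind (PySem.Str.lower op) then PySem.Set.add s ind else s) s) s1,
         ops.foldl (fun s op => MULTIMODAL_INDICATORS.foldl (fun s ind => if PySem.Str.isIn ind (PySem.Str.lower op) then PySem.Set.add s ind else s) s) s2) := by
  induction ops generalizing s1 s2 with
  | nil => rfl
  | cons a t ih => simp only [List.foldl_cons, ih]

-- membership/nodup through B's outer fold (one indicator list over all operators)
theorem pv_mem_outer (inds : List String) (ops : List String) (s : PySem.Set String) (x : String) :
    x ∈ ops.foldl (fun s op =>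
        inds.foldl (fun s ind => if PySem.Str.isIn ind (PySem.Str.lower op) then PySem.Set.add s ind else s) s) s ↔
      x ∈ s ∨ (x ∈ inds ∧ ∃ op ∈ ops, PySem.Str.isIn x (PySem.Str.lower op) = true) := by
  induction ops generalizing s with
  | nil => simp
  | cons o t ih =>
    simp only [List.foldl_cons, ih, pv_mem_inner]
    constructor
    · rintro ((h1 | ⟨hm, hx⟩) | ⟨hm, o', ho', hx⟩)
      · exact Or.inl h1
      · exact Or.inr ⟨hm, o, List.mem_cons_self, hx⟩
      · exact Or.inr ⟨hm, o', List.mem_cons_of_mem _ ho', hx⟩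
    · rintro (h1 | ⟨hm, o', ho', hx⟩)
      · exact Or.inl (Or.inl h1)
      · rcases List.mem_cons.mp ho' with rfl | ho'
        · exact Or.inl (Or.inr ⟨hm, hx⟩)
        · exact Or.inr ⟨hm, o', ho', hx⟩

theorem pv_nodup_outer (inds : List String) (ops : List String) (s : PySem.Set String)
    (hs : s.Nodup) :
    (ops.foldl (fun s op =>
        inds.foldl (fun s ind => if PySem.Str.isIn ind (PySem.Str.lower op) then PySem.Set.add s ind else s) s) s).Nodup := by
  induction ops generalizing s with
  | nil => exact hs
  | cons o t ih => exact ih _ (pv_nodup_inner _ _ _ hs)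

-- size of the matched set = number of indicators matched by some operator
theorem pv_len_outer (inds : List String) (hinds : inds.Nodup) (ops : List String) :
    PySem.Set.len (ops.foldl (fun s op =>
        inds.foldl (fun s ind => if PySem.Str.isIn ind (PySem.Str.lower op) then PySem.Set.add s ind else s) s)
        PySem.Set.empty)
      = (inds.countP (fun ind => ops.any (fun op => PySem.Str.isIn ind (PySem.Str.lower op))) : Int) := by
  rw [List.countP_eq_length_filter]
  have hperm : (ops.foldl (fun s op =>
      inds.foldl (fun s ind => if PySem.Str.isIn ind (PySem.Str.lower op) then PySem.Set.add s ind else s) s)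
      PySem.Set.empty).Perm
      (inds.filter (fun ind => ops.any (fun op => PySem.Str.isIn ind (PySem.Str.lower op)))) := by
    apply List.perm_of_nodup_nodup_toFinset_eq
    · exact pv_nodup_outer inds ops _ (by simp [PySem.Set.empty])
    · exact hinds.filter _
    · ext x
      simp only [List.mem_toFinset, pv_mem_outer, List.mem_filter, List.any_eq_true,
        PySem.Set.empty, List.not_mem_nil, false_or]
  simp only [PySem.Set.len]
  exact_mod_cast hperm.length_eq

-- every indicator is nonempty and space-free (the fact B's correctness rests on)
theorem pv_indicators_ok :
    ∀ ind ∈ RAG_INDICATORS ++ MULTIMODAL_INDICATORS, ind.toList ≠ [] ∧ ' ' ∉ ind.toList := by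
  decide

-- A's blob test agrees with "some operator matches", for any space-free nonempty indicator
theorem pv_blob_eq_any (ops : List String) (ind : String)
    (hne : ind.toList ≠ []) (hc : ' ' ∉ ind.toList) :
    PySem.Str.isIn ind (PySem.Str.join " " (ops.map PySem.Str.lower))
      = ops.any (fun op => PySem.Str.isIn ind (PySem.Str.lower op)) := by
  have hjoin : (PySem.Str.join " " (ops.map PySem.Str.lower)).toList
      = PySem.Chars.join [' '] ((ops.map PySem.Str.lower).map String.toList) := by
    simp
  rw [Bool.eq_iff_iff]
  rw [show PySem.Str.isIn ind (PySem.Str.join " " (ops.map PySem.Str.lower))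
        = PySem.Chars.isIn ind.toList (PySem.Str.join " " (ops.map PySem.Str.lower)).toList from
      (PySem.Str.isIn_eq _ _).symm ▸ rfl]
  rw [hjoin, pv_isIn_join _ hne hc]
  simp only [List.any_eq_true, List.map_map, List.mem_map, Function.comp]
  constructor
  · rintro ⟨p, ⟨op, hop, rfl⟩, hx⟩
    exact ⟨op, hop, by simpa using hx⟩
  · rintro ⟨op, hop, hx⟩
    exact ⟨(PySem.Str.lower op).toList, ⟨op, hop, rfl⟩, by simpa using hx⟩

-- ===== VERDICT (by name: the statement is the Claim_ definition above) =====
theorem classify_workflow_from_operators_py_spec : Claim_equal_classify_workflow_from_operators_py := by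
  intro operators _
  unfold Spec_classify_workflow_from_operators_py
  unfold classify_workflow_from_operators_py classify_workflow_from_operators_py_alt
  by_cases hops : operators = []
  · simp [hops]
  · simp only [hops, if_neg, not_false_iff]
    rw [pv_fold_pair operators PySem.Set.empty PySem.Set.empty]
    have hragN : RAG_INDICATORS.Nodup := by decide
    have hmmN : MULTIMODAL_INDICATORS.Nodup := by decide
    rw [pv_len_outer RAG_INDICATORS hragN operators, pv_len_outer MULTIMODAL_INDICATORS hmmN operators]
    have hrag : RAG_INDICATORS.countP
        (fun ind => PySem.Str.isIn ind (PySem.Str.join " " (operators.map PySem.Str.lower)))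
        = RAG_INDICATORS.countP
          (fun ind => operators.any (fun op => PySem.Str.isIn ind (PySem.Str.lower op))) := by
      apply List.countP_congr
      intro ind hind
      rw [pv_blob_eq_any operators ind
        (pv_indicators_ok ind (List.mem_append_left _ hind)).1
        (pv_indicators_ok ind (List.mem_append_left _ hind)).2]
    have hmm : MULTIMODAL_INDICATORS.countP
        (fun ind => PySem.Str.isIn ind (PySem.Str.join " " (operators.map PySem.Str.lower)))
        = MULTIMODAL_INDICATORS.countP
          (fun ind => operators.any (fun op => PySem.Str.isIn ind (PySem.Str.lower op))) := by
      apply List.countP_congr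
      intro ind hind
      rw [pv_blob_eq_any operators ind
        (pv_indicators_ok ind (List.mem_append_right _ hind)).1
        (pv_indicators_ok ind (List.mem_append_right _ hind)).2]
    rw [hrag, hmm]
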